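-- pv_equiv track=rewrite | github.com/Mukti-J/Encryption-Algorithm | Bacon's Cipher/BaconsCipherGUI.py | bacons_cipher_encrypt
-- ===== SOURCE A (Python) =====
-- def bacons_cipher_encrypt(text):
--     bacon_dict = {
--         'A': 'AAAAA', 'B': 'AAAAB', 'C': 'AAABA', 'D': 'AAABB', 'E': 'AABAA',
--         'F': 'AABAB', 'G': 'AABBA', 'H': 'AABBB', 'I': 'ABAAA', 'J': 'ABAAB',
--         'K': 'ABABA', 'L': 'ABABB', 'M': 'ABBAA', 'N': 'ABBAB', 'O': 'ABBBA',
--         'P': 'ABBBB', 'Q': 'BAAAA', 'R': 'BAAAB', 'S': 'BAABA', 'T': 'BAABB',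
--         'U': 'BABAA', 'V': 'BABAB', 'W': 'BABBA', 'X': 'BABBB', 'Y': 'BBAAA', 'Z': 'BBAAB',
--         ' ': 'BBABB'  # Add a special code for Space
--     }
--     result = ''
--     for char in text.upper():
--         if char in bacon_dict:
--             result += bacon_dict[char] + ' '
--         else:
--             result += char + ' '
--     return result.strip()
-- ===== SOURCE B (Python) =====
-- def bacons_cipher_encrypt(text):
--     def code(c):
--         if 'A' <= c <= 'Z':
--             return ''.join('B' if b == '1' else 'A' for b in format(ord(c) - 65, '05b'))
--         if c == ' ':
--             return 'BBABB'
--         return c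
--     return ' '.join(code(c) for c in text.upper()).strip()
-- ===== Notes on version B (the rewrite author's own statement) =====
-- stated objective: idiomatic
-- what changed: Each letter's 5-symbol code is computed arithmetically from its ordinal (5-bit binary of ord minus 65, zero bit to A and one bit to B, with the space character special-cased) and the pieces are assembled via a space-join followed by strip, replacing the hardcoded 27-entry dictionary and the string-concatenation loop.
import Mathlib
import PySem

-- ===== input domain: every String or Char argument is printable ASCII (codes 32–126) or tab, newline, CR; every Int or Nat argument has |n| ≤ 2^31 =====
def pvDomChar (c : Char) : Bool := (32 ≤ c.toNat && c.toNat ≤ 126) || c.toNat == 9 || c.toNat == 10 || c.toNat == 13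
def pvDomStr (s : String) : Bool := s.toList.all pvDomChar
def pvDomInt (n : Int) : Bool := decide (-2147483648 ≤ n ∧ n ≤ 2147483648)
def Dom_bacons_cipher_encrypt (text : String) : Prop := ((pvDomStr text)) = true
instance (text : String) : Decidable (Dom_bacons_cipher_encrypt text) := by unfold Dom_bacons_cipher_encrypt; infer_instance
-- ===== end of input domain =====

-- B computes each letter's code from its ordinal (5-bit binary, 0→A/1→B) and joins the
-- pieces with ' '.join(...).strip(), instead of A's hardcoded 27-entry dict and += loop
-- (objective: idiomatic; same cost).

-- ===== PORT A =====
-- the hardcoded 27-entry table, keys ported as Char (iteration over a Python str yields 1-char strings)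
def baconDict : PySem.Dict Char (List Char) := PySem.Dict.ofList
  [('A', "AAAAA".toList),
   ('B', "AAAAB".toList),
   ('C', "AAABA".toList),
   ('D', "AAABB".toList),
   ('E', "AABAA".toList),
   ('F', "AABAB".toList),
   ('G', "AABBA".toList),
   ('H', "AABBB".toList),
   ('I', "ABAAA".toList),
   ('J', "ABAAB".toList),
   ('K', "ABABA".toList),
   ('L', "ABABB".toList),
   ('M', "ABBAA".toList),
   ('N', "ABBAB".toList),
   ('O', "ABBBA".toList),
   ('P', "ABBBB".toList),
   ('Q', "BAAAA".toList),
   ('R', "BAAAB".toList),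
   ('S', "BAABA".toList),
   ('T', "BAABB".toList),
   ('U', "BABAA".toList),
   ('V', "BABAB".toList),
   ('W', "BABBA".toList),
   ('X', "BABBB".toList),
   ('Y', "BBAAA".toList),
   ('Z', "BBAAB".toList),
   (' ', "BBABB".toList)]

def bacons_cipher_encrypt (text : String) : String :=
  let result : List Char :=
    (PySem.Chars.upper text.toList).foldl
      (fun acc char =>
        match PySem.Dict.get? baconDict char with
        | some code => acc ++ code ++ [' ']     -- char in bacon_dict
        | none      => acc ++ [char] ++ [' '])  -- else branch
      []
  String.ofList (PySem.Chars.strip result)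

-- ===== PORT B =====
-- code(c) of Source B: 5-bit binary of ord(c)-65 with '1'→'B' else 'A'; ' ' → "BBABB"; else c itself
def baconCode (c : Char) : List Char :=
  if 'A' ≤ c ∧ c ≤ 'Z' then
    (PySem.Chars.zfill (PySem.Int.toBinChars ((c.toNat : Int) - 65)) 5).map
      (fun b => if b = '1' then 'B' else 'A')
  else if c = ' ' then "BBABB".toList
  else [c]

def bacons_cipher_encrypt_alt (text : String) : String :=
  String.ofList (PySem.Chars.strip
    (PySem.Chars.join [' '] ((PySem.Chars.upper text.toList).map baconCode)))

-- ===== PRECONDITION & SPEC =====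
def Spec_bacons_cipher_encrypt (text : String) (out : String) : Prop := out = bacons_cipher_encrypt_alt text
instance (text : String) (out : String) : Decidable (Spec_bacons_cipher_encrypt text out) := by unfold Spec_bacons_cipher_encrypt; infer_instance

-- ===== CLAIM (what is proved, stated in full; the proofs are below) =====
def Claim_equal_bacons_cipher_encrypt : Prop := ∀ (text : String), Dom_bacons_cipher_encrypt text → Spec_bacons_cipher_encrypt text (bacons_cipher_encrypt text)

-- ===== LEMMAS AND PROOFS =====

-- A's per-character piece (table lookup with identity fallback)
def pieceA (c : Char) : List Char :=
  match PySem.Dict.get? baconDict c with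
  | some code => code
  | none      => [c]

-- on every ASCII character the table lookup and the arithmetic code agree
set_option maxRecDepth 8000 in
theorem pieceA_eq_baconCode_ascii : ∀ n < 128, pieceA (Char.ofNat n) = baconCode (Char.ofNat n) := by
  decide

theorem upperChar_ascii : ∀ n < 128, (PySem.Chars.upperChar (Char.ofNat n)).toNat < 128 := by
  decide

theorem pieceA_eq_baconCode {c : Char} (h : c.toNat < 128) : pieceA c = baconCode c := by
  have hc : Char.ofNat c.toNat = c := Char.ofNat_toNat c
  have := pieceA_eq_baconCode_ascii c.toNat h
  rwa [hc] at this

-- A's += loop is concatenation of the pieces, each followed by a space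
theorem foldl_pieces (u : List Char) (acc : List Char) :
    u.foldl (fun acc char =>
        match PySem.Dict.get? baconDict char with
        | some code => acc ++ code ++ [' ']
        | none      => acc ++ [char] ++ [' ']) acc
      = acc ++ u.flatMap (fun c => pieceA c ++ [' ']) := by
  induction u generalizing acc with
  | nil => simp
  | cons c rest ih =>
      simp only [List.foldl_cons, List.flatMap_cons, ih, pieceA]
      cases PySem.Dict.get? baconDict c <;> simp

-- piece-plus-space concatenation vs ' '.join, for a nonempty list of pieces
theorem flatMap_eq_join_append {f : Char → List Char} (u : List Char) (hu : u ≠ []) :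
    u.flatMap (fun c => f c ++ [' ']) = PySem.Chars.join [' '] (u.map f) ++ [' '] := by
  induction u with
  | nil => exact absurd rfl hu
  | cons c rest ih =>
      cases rest with
      | nil => simp [PySem.Chars.join, List.intercalate]
      | cons d rest' =>
          rw [List.flatMap_cons, ih (by simp)]
          simp only [List.map_cons, PySem.Chars.join_cons_cons]
          simp

theorem rstrip_append_space (xs : List Char) :
    PySem.Chars.rstrip (xs ++ [' ']) = PySem.Chars.rstrip xs := by
  simp [PySem.Chars.rstrip, PySem.Chars.isspace]

-- a trailing space does not change strip's result
theorem strip_append_space (xs : List Char) :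
    PySem.Chars.strip (xs ++ [' ']) = PySem.Chars.strip xs := by
  unfold PySem.Chars.strip PySem.Chars.lstrip
  rw [List.dropWhile_append]
  rcases h : List.dropWhile PySem.Chars.isspace xs with _ | ⟨c, cs⟩
  · simp [PySem.Chars.isspace, PySem.Chars.rstrip]
  · simp only [List.isEmpty_cons, Bool.false_eq_true, if_false]
    exact rstrip_append_space _

-- ===== VERDICT (by name: the statement is the Claim_ definition above) =====
theorem bacons_cipher_encrypt_spec : Claim_equal_bacons_cipher_encrypt := by
  intro text hdom
  unfold Spec_bacons_cipher_encrypt bacons_cipher_encrypt bacons_cipher_encrypt_alt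
  simp only []
  rw [foldl_pieces, List.nil_append]
  -- every character of upper(text) is ASCII, so the pieces agree
  have hchars : ∀ c ∈ PySem.Chars.upper text.toList, pieceA c = baconCode c := by
    intro c hc
    simp only [PySem.Chars.upper, List.mem_map] at hc
    obtain ⟨c₀, hc₀, rfl⟩ := hc
    have hd : pvDomChar c₀ = true := List.all_eq_true.mp hdom c₀ hc₀
    have h0 : c₀.toNat < 128 := by
      simp [pvDomChar] at hd
      omega
    have hc128 : (PySem.Chars.upperChar c₀).toNat < 128 := by
      have := upperChar_ascii c₀.toNat h0
      rwa [Char.ofNat_toNat] at this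
    exact pieceA_eq_baconCode hc128
  rcases hu : PySem.Chars.upper text.toList with _ | ⟨c, rest⟩
  · simp [PySem.Chars.join, List.intercalate, PySem.Chars.strip, PySem.Chars.lstrip,
          PySem.Chars.rstrip]
  · rw [← hu]
    have hne : PySem.Chars.upper text.toList ≠ [] := by rw [hu]; simp
    have hfm : (PySem.Chars.upper text.toList).flatMap (fun c => pieceA c ++ [' '])
        = (PySem.Chars.upper text.toList).flatMap (fun c => baconCode c ++ [' ']) := by
      apply List.flatMap_congr
      intro c hc
      rw [hchars c hc]
    rw [hfm, flatMap_eq_join_append _ hne, strip_append_space]
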